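-- pv_equiv track=rewrite | github.com/Fabrizio-Caruso/CROSS-LIB | src/assets/generate_assets.py | generate_160A_asset
-- ===== SOURCE A (Python) =====
-- def generate_160A_asset(two_bit_assets):
--    row_map = {0:[], 1:[], 2:[], 3:[], 4:[], 5:[], 6:[], 7:[]}
--    two_bit_160A_asset = []
--
--    counter = 0
--    for byte_couple in two_bit_assets:
--        row_map[counter&7].extend(byte_couple)
--        counter+=1
--
--    for i in range(0,8):
--        two_bit_160A_asset.extend(row_map[7-i])
--
--    return two_bit_160A_asset
-- ===== SOURCE B (Python) =====
-- def generate_160A_asset(two_bit_assets):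
--     out = []
--     for row in range(7, -1, -1):
--         for i, couple in enumerate(two_bit_assets):
--             if i & 7 == row:
--                 out.extend(couple)
--     return out
-- ===== Notes on version B (the rewrite author's own statement) =====
-- stated objective: simpler
-- what changed: Replaces the 8-bucket dictionary plus reverse concatenation with no auxiliary structure at all: an outer loop over rows 7..0 that rescans the input and appends the couples whose index lands in that row.
import Mathlib
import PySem

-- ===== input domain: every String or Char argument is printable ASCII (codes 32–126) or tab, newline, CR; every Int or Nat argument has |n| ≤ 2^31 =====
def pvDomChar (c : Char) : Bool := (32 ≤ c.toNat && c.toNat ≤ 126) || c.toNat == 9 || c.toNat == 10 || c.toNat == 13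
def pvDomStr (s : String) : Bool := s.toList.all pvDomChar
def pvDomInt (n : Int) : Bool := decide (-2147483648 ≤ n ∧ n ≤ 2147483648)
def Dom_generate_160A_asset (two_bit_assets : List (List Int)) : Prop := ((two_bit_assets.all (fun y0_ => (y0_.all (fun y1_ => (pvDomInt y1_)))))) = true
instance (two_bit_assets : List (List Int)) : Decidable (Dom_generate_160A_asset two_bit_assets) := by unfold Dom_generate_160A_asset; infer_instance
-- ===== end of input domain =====

-- B drops A's 8-bucket dictionary: it loops rows 7..0 and rescans the input, appending the
-- couples whose index falls in that row (objective: simpler; same return value, no mutation).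

-- ===== PORT A =====
-- row_map = {0:[], …, 7:[]}
def pvRowMap0 : PySem.Dict Int (List Int) :=
  PySem.Dict.mk [(0, []), (1, []), (2, []), (3, []), (4, []), (5, []), (6, []), (7, [])]

-- loop body: row_map[counter&7].extend(byte_couple); counter += 1
-- (the key counter&7 is always present in row_map, so Dict.modify is exact here)
def pvStepA (st : PySem.Dict Int (List Int) × Int) (byte_couple : List Int) :
    PySem.Dict Int (List Int) × Int :=
  (st.1.modify (PySem.Int.band st.2 7) [] (fun row => row ++ byte_couple), st.2 + 1)

def generate_160A_asset (two_bit_assets : List (List Int)) : List Int :=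
  let st := two_bit_assets.foldl pvStepA (pvRowMap0, 0)
  -- for i in range(0,8): two_bit_160A_asset.extend(row_map[7-i])
  -- (the key 7-i is always present in row_map, so getD is exact here)
  (PySem.List.pyRange 0 8 1).foldl (fun out i => out ++ st.1.getD (7 - i) []) []

-- ===== PORT B =====
-- enumerate(two_bit_assets) starting at index n (Python indices are nonnegative, hence Nat)
def pvEnum : Nat → List (List Int) → List (Nat × List Int)
  | _, [] => []
  | n, x :: t => (n, x) :: pvEnum (n + 1) t

def generate_160A_asset_alt (two_bit_assets : List (List Int)) : List Int :=
  (PySem.List.pyRange 7 (-1) (-1)).foldl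
    (fun out row =>
      (pvEnum 0 two_bit_assets).foldl
        (fun out2 p => if PySem.Int.band (p.1 : Int) 7 = row then out2 ++ p.2 else out2) out)
    []

-- ===== PRECONDITION & SPEC =====
def Spec_generate_160A_asset (two_bit_assets : List (List Int)) (out : List Int) : Prop := out = generate_160A_asset_alt two_bit_assets
instance (two_bit_assets : List (List Int)) (out : List Int) : Decidable (Spec_generate_160A_asset two_bit_assets out) := by unfold Spec_generate_160A_asset; infer_instance

-- ===== CLAIM (what is proved, stated in full; the proofs are below) =====
def Claim_equal_generate_160A_asset : Prop := ∀ (two_bit_assets : List (List Int)), Dom_generate_160A_asset two_bit_assets → Spec_generate_160A_asset two_bit_assets (generate_160A_asset two_bit_assets)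

-- ===== LEMMAS AND PROOFS =====

-- the contents of row c%8 contributed by xs when the first element has index c
def pvBucket (r : Nat) : Nat → List (List Int) → List Int
  | _, [] => []
  | c, y :: t => (if c % 8 = r then y else []) ++ pvBucket r (c + 1) t

theorem pvBand7 (c : Nat) : PySem.Int.band (c : Int) 7 = ((c % 8 : Nat) : Int) := by
  have h7 : (7 : Int) = ((7 : Nat) : Int) := rfl
  rw [h7, PySem.Int.band_natCast]
  have h : c &&& 7 = c % 8 := by
    have := Nat.and_two_pow_sub_one_eq_mod c 3
    norm_num at this
    exact this
  exact_mod_cast congrArg (Nat.cast (R := Int)) h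

theorem pvFoldA (xs : List (List Int)) : ∀ (c : Nat) (v0 v1 v2 v3 v4 v5 v6 v7 : List Int),
    xs.foldl pvStepA
      (PySem.Dict.mk [(0, v0), (1, v1), (2, v2), (3, v3), (4, v4), (5, v5), (6, v6), (7, v7)],
        (c : Int)) =
    (PySem.Dict.mk [(0, v0 ++ pvBucket 0 c xs), (1, v1 ++ pvBucket 1 c xs),
       (2, v2 ++ pvBucket 2 c xs), (3, v3 ++ pvBucket 3 c xs), (4, v4 ++ pvBucket 4 c xs),
       (5, v5 ++ pvBucket 5 c xs), (6, v6 ++ pvBucket 6 c xs), (7, v7 ++ pvBucket 7 c xs)],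
      ((c + xs.length : Nat) : Int)) := by
  induction xs with
  | nil => intro c v0 v1 v2 v3 v4 v5 v6 v7; simp [pvBucket]
  | cons y t ih =>
    intro c v0 v1 v2 v3 v4 v5 v6 v7
    have hc1 : ((c : Int) + 1) = ((c + 1 : Nat) : Int) := by push_cast; ring
    have h8 : c % 8 = 0 ∨ c % 8 = 1 ∨ c % 8 = 2 ∨ c % 8 = 3 ∨ c % 8 = 4 ∨ c % 8 = 5 ∨
        c % 8 = 6 ∨ c % 8 = 7 := by omega
    simp only [List.foldl_cons, pvStepA, pvBand7, hc1, pvBucket]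
    rcases h8 with h | h | h | h | h | h | h | h <;> rw [h] <;>
      simp only [PySem.Dict.modify, PySem.Dict.insert, PySem.Dict.getD, PySem.Dict.get?,
        PySem.Dict.contains] <;>
      norm_num <;>
      rw [hc1, ih] <;>
      simp [List.append_assoc] <;>
      try omega

theorem pvFoldB (r : Nat) (xs : List (List Int)) : ∀ (n : Nat) (acc : List Int),
    (pvEnum n xs).foldl
      (fun out2 p => if PySem.Int.band (p.1 : Int) 7 = ((r : Nat) : Int) then out2 ++ p.2 else out2)
      acc = acc ++ pvBucket r n xs := by
  induction xs with
  | nil => intro n acc; simp [pvEnum, pvBucket]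
  | cons y t ih =>
    intro n acc
    have hstep : pvEnum n (y :: t) = (n, y) :: pvEnum (n + 1) t := rfl
    rw [hstep, List.foldl_cons, ih]
    have hbuck : pvBucket r n (y :: t) = (if n % 8 = r then y else []) ++ pvBucket r (n + 1) t :=
      rfl
    rw [hbuck]
    simp only [pvBand7]
    by_cases h : n % 8 = r
    · simp [h, List.append_assoc]
    · have h2 : ¬ ((n : Int) % 8 = ((r : Nat) : Int)) := by omega
      simp [h, h2]

-- ===== VERDICT (by name: the statement is the Claim_ definition above) =====
theorem generate_160A_asset_spec : Claim_equal_generate_160A_asset := by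
  intro xs _
  unfold Spec_generate_160A_asset generate_160A_asset generate_160A_asset_alt
  have hr1 : PySem.List.pyRange 0 8 1 = [0, 1, 2, 3, 4, 5, 6, 7] := by decide
  have hr2 : PySem.List.pyRange 7 (-1) (-1) = [7, 6, 5, 4, 3, 2, 1, 0] := by decide
  have hA := pvFoldA xs 0 [] [] [] [] [] [] [] []
  have h0 : ((0 : Nat) : Int) = (0 : Int) := rfl
  rw [h0] at hA
  have hcast : ∀ r : Nat, r < 8 → ((r : Nat) : Int) = (r : Int) := by intro r _; rfl
  simp only [hr1, hr2, List.foldl_cons, List.foldl_nil]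
  rw [show pvRowMap0 = PySem.Dict.mk [(0, ([] : List Int)), (1, []), (2, []), (3, []), (4, []),
    (5, []), (6, []), (7, [])] from rfl, hA]
  have hB7 := pvFoldB 7 xs 0
  have hB6 := pvFoldB 6 xs 0
  have hB5 := pvFoldB 5 xs 0
  have hB4 := pvFoldB 4 xs 0
  have hB3 := pvFoldB 3 xs 0
  have hB2 := pvFoldB 2 xs 0
  have hB1 := pvFoldB 1 xs 0
  have hB0 := pvFoldB 0 xs 0
  simp only [Nat.cast_ofNat, Nat.cast_one, Nat.cast_zero] at hB7 hB6 hB5 hB4 hB3 hB2 hB1 hB0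
  rw [hB7, hB6, hB5, hB4, hB3, hB2, hB1, hB0]
  simp [PySem.Dict.getD, PySem.Dict.get?, List.append_assoc]
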